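-- pv_equiv track=rewrite | github.com/pypi-data/pypi-mirror-390 | packages/ide4ai/ide4ai-0.1.0b0.tar.gz/ide4ai-0.1.0b0/ide4ai/environment/workspace/utils.py | last_non_whitespace_index
-- ===== SOURCE A (Python) =====
-- def last_non_whitespace_index(s: str, start_index: int | None = None) -> int:
--     """
--     Returns the last index of the string that is not whitespace.
--     If the string is empty or contains only whitespaces, or the start index is out of range, returns -1.
--     """
--     if start_index is None:
--         start_index = len(s) - 1
--     start_index = min(start_index, len(s) - 1)
--     for i in range(start_index, -1, -1):
--         if not s[i].isspace():
--             return i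
--     return -1
-- ===== SOURCE B (Python) =====
-- def last_non_whitespace_index(s: str, start_index: int | None = None) -> int:
--     """Slice + rstrip instead of an explicit backward scan."""
--     end = len(s) - 1 if start_index is None else min(start_index, len(s) - 1)
--     if end < 0:
--         return -1
--     return len(s[:end + 1].rstrip()) - 1
-- ===== Notes on version B (the rewrite author's own statement) =====
-- stated objective: simpler
-- what changed: Replaces the explicit backward index loop with a slice of the prefix up to the start index, rstrip of trailing whitespace, and a length computation.
import Mathlib
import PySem

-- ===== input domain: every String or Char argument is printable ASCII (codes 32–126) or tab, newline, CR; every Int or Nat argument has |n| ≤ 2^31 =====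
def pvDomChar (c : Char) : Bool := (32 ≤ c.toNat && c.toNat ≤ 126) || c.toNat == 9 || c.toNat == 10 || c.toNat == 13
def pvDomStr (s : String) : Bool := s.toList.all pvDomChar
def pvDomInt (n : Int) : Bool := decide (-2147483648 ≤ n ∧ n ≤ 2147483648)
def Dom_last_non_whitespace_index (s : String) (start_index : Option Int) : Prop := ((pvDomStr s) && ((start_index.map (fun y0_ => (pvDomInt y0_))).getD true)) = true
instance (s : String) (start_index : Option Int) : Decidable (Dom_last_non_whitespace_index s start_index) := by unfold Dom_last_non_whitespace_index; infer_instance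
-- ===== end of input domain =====

-- B replaces A's explicit backward index loop with slice + rstrip + length (simpler decomposition, same cost).


-- ===== PORT A =====
-- the backward for-loop 'for i in range(start, -1, -1)' as recursion on the index
def lnwLoopA (cs : List Char) (i : Nat) : Int :=
  if ¬ (PySem.Chars.isspace ((cs[i]?).getD ' ')) then (i : Int)
  else if i = 0 then -1
  else lnwLoopA cs (i - 1)

def last_non_whitespace_index (s : String) (start_index : Option Int) : Int :=
  let cs := s.toList
  let st0 : Int := match start_index with
    | none => (cs.length : Int) - 1
    | some k => k
  let st : Int := min st0 ((cs.length : Int) - 1)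
  if st < 0 then -1 else lnwLoopA cs st.toNat

-- ===== PORT B =====
def last_non_whitespace_index_alt (s : String) (start_index : Option Int) : Int :=
  let cs := s.toList
  let e : Int := match start_index with
    | none => (cs.length : Int) - 1
    | some k => min k ((cs.length : Int) - 1)
  if e < 0 then -1
  else ((PySem.Chars.rstrip (PySem.List.slice cs none (some (e + 1)))).length : Int) - 1

-- ===== PRECONDITION & SPEC =====
def Spec_last_non_whitespace_index (s : String) (start_index : Option Int) (out : Int) : Prop := out = last_non_whitespace_index_alt s start_index
instance (s : String) (start_index : Option Int) (out : Int) : Decidable (Spec_last_non_whitespace_index s start_index out) := by unfold Spec_last_non_whitespace_index; infer_instance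

-- ===== CLAIM (what is proved, stated in full; the proofs are below) =====
def Claim_equal_last_non_whitespace_index : Prop := ∀ (s : String) (start_index : Option Int), Dom_last_non_whitespace_index s start_index → Spec_last_non_whitespace_index s start_index (last_non_whitespace_index s start_index)

-- ===== LEMMAS AND PROOFS =====

theorem lnwLoopA_eq_rstrip (cs : List Char) (i : Nat) (hi : i < cs.length) :
    lnwLoopA cs i = ((List.dropWhile PySem.Chars.isspace (cs.take (i + 1)).reverse).length : Int) - 1 := by
  induction i with
  | zero =>
    have hrev : (cs.take 1).reverse = [cs[0]] := by
      rw [List.take_succ]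
      simp [List.getElem?_eq_getElem hi]
    rw [lnwLoopA, hrev]
    simp only [List.getElem?_eq_getElem hi, Option.getD_some]
    by_cases h : PySem.Chars.isspace cs[0] = true
    · simp [List.dropWhile, h]
    · simp [List.dropWhile, h]
  | succ j ih =>
    have hj : j < cs.length := Nat.lt_of_succ_lt hi
    have hrev : (cs.take (j + 1 + 1)).reverse = cs[j + 1] :: (cs.take (j + 1)).reverse := by
      rw [List.take_succ]
      simp [List.getElem?_eq_getElem hi]
    rw [lnwLoopA, hrev]
    simp only [List.getElem?_eq_getElem hi, Option.getD_some]
    by_cases h : PySem.Chars.isspace cs[j + 1] = true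
    · simp only [h, not_true_eq_false, if_false, List.dropWhile_cons, if_pos h]
      rw [if_neg (Nat.succ_ne_zero j)]
      simpa using ih hj
    · simp only [h, List.dropWhile_cons]
      rw [if_pos (by simp [h]), if_neg (by simp [h])]
      simp
      omega

theorem lnw_branch (cs : List Char) (e : Int) (hle : e ≤ (cs.length : Int) - 1) :
    (if e < 0 then (-1 : Int) else lnwLoopA cs e.toNat)
      = if e < 0 then -1
        else ((PySem.Chars.rstrip (PySem.List.slice cs none (some (e + 1)))).length : Int) - 1 := by
  by_cases hneg : e < 0
  · simp [hneg]
  · have h0 : 0 ≤ e := le_of_not_gt hneg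
    have hlt : e.toNat < cs.length := by omega
    have h1 : e + 1 = ((e.toNat + 1 : Nat) : Int) := by omega
    rw [if_neg hneg, if_neg hneg, h1, PySem.List.slice_to_natCast,
      lnwLoopA_eq_rstrip cs e.toNat hlt]
    simp [PySem.Chars.rstrip]

-- ===== VERDICT (by name: the statement is the Claim_ definition above) =====
theorem last_non_whitespace_index_spec : Claim_equal_last_non_whitespace_index := by
  intro s start_index _
  unfold Spec_last_non_whitespace_index last_non_whitespace_index last_non_whitespace_index_alt
  cases start_index with
  | none =>
      simpa [min_self] using
        lnw_branch s.toList ((s.toList.length : Int) - 1) (le_refl _)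
  | some k =>
      simpa using
        lnw_branch s.toList (min k ((s.toList.length : Int) - 1)) (min_le_right _ _)
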